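-- pv_equiv track=rewrite | github.com/vovashkil/vovashkil.github.io | docs/aci/165-developer-fundamentals-2/canvas_files/w8-elearning-code-questions.py | find_zero_sum
-- ===== SOURCE A (Python) =====
-- def find_zero_sum(input_list):
--     # iterate through each list element
--     for i in range(len(input_list)):
--         curr_elem = input_list[i]
--
--         # check for the simple case of current element being 0
--         if curr_elem == 0:
--             return i
--
--         # sum is initialized with the current element
--         sum = curr_elem
--
--         # now go forward from this element
--         for j in range(i + 1, len(input_list)):
--             # keep adding to the sum, until it adds to 0
--             sum += input_list[j]
--             if sum == 0:
--                 return j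
--
--     # if nothing was found yet, return -1
--     return -1
-- ===== SOURCE B (Python) =====
-- def find_zero_sum(input_list):
--     n = len(input_list)
--     # prefix[t] = sum of the first t elements; a zero-sum subarray i..j means prefix[j+1] == prefix[i]
--     prefix = [0]
--     for x in input_list:
--         prefix.append(prefix[-1] + x)
--     # last occurrence index of each prefix value (one pass, O(n) with a dict)
--     last = {}
--     for t, v in enumerate(prefix):
--         last[v] = t
--     # smallest i whose prefix value recurs later; answer is (its next occurrence) - 1
--     for i, v in enumerate(prefix):
--         if last[v] > i:
--             for t in range(i + 1, n + 1):
--                 if prefix[t] == v: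
--                     return t - 1
--     return -1
-- ===== Notes on version B (the rewrite author's own statement) =====
-- stated objective: faster
-- what changed: Replaces the nested re-summation of every subarray by prefix sums plus a dict mapping each prefix value to its last occurrence, so the qualifying start index is found in one scan and only one forward scan recovers the answer.
import Mathlib
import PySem

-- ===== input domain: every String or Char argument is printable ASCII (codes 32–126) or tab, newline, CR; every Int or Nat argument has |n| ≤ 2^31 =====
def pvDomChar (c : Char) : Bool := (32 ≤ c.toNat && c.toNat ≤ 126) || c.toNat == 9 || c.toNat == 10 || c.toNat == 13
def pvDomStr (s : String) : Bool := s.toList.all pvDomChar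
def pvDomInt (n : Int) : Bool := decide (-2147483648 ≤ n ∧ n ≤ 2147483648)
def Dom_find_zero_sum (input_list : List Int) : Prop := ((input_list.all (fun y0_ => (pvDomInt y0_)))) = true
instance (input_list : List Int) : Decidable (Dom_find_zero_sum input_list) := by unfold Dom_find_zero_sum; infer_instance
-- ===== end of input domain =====

-- B replaces A's quadratic nested re-summation by prefix sums with a last-occurrence dict: O(n) instead of O(n^2).

-- ===== PORT A =====
-- inner loop of A: 'for j in range(i+1, len(l)): sum += l[j]; if sum == 0: return j'
-- (every index the loop produces is < l.length, so getD is exact there)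
def pvInnerA (l : List Int) : Int → List Nat → Option Nat
  | _, [] => none
  | s, j :: js =>
      let s' := s + l.getD j 0
      if s' = 0 then some j else pvInnerA l s' js

-- outer loop of A over i ∈ range(len(l))
def pvOuterA (l : List Int) : List Nat → Int
  | [] => -1
  | i :: is =>
      let c := l.getD i 0
      if c = 0 then (i : Int)
      else
        match pvInnerA l c (List.range' (i+1) (l.length - (i+1))) with
        | some j => (j : Int)
        | none => pvOuterA l is

def find_zero_sum (input_list : List Int) : Int :=
  pvOuterA input_list (List.range input_list.length)

-- ===== PORT B =====
-- 'prefix = [0]; for x in l: prefix.append(prefix[-1] + x)'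
def pvBuildPrefix (l : List Int) : List Int :=
  l.foldl (fun acc x => acc ++ [PySem.List.pyGetD acc (-1) 0 + x]) [0]

-- 'last = {}; for t, v in enumerate(prefix): last[v] = t'
def pvLastDict (pre : List Int) : PySem.Dict Int Int :=
  (PySem.List.enumerate pre 0).foldl (fun d tv => d.insert tv.2 tv.1) PySem.Dict.empty

-- inner loop of B: 'for t in range(i+1, n+1): if prefix[t] == v: return t - 1'  (returns t, caller subtracts)
def pvFindT (pre : List Int) (v : Int) : List Int → Option Int
  | [] => none
  | t :: ts => if PySem.List.pyGetD pre t 0 = v then some t else pvFindT pre v ts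

-- outer loop of B over enumerate(prefix); 'last[v]' always exists, so getD is exact
def pvOuterB (pre : List Int) (n : Nat) (d : PySem.Dict Int Int) : List (Int × Int) → Int
  | [] => -1
  | (i, v) :: rest =>
      if d.getD v 0 > i then
        match pvFindT pre v (PySem.List.pyRange (i+1) ((n : Int)+1) 1) with
        | some t => t - 1
        | none => pvOuterB pre n d rest
      else pvOuterB pre n d rest

def find_zero_sum_alt (input_list : List Int) : Int :=
  let n := input_list.length
  let pre := pvBuildPrefix input_list
  let d := pvLastDict pre
  pvOuterB pre n d (PySem.List.enumerate pre 0)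

-- ===== PRECONDITION & SPEC =====
def Spec_find_zero_sum (input_list : List Int) (out : Int) : Prop := out = find_zero_sum_alt input_list
instance (input_list : List Int) (out : Int) : Decidable (Spec_find_zero_sum input_list out) := by unfold Spec_find_zero_sum; infer_instance

-- ===== CLAIM (what is proved, stated in full; the proofs are below) =====
def Claim_equal_find_zero_sum : Prop := ∀ (input_list : List Int), Dom_find_zero_sum input_list → Spec_find_zero_sum input_list (find_zero_sum input_list)

-- ===== LEMMAS AND PROOFS =====

-- prefix sum of the first t elements
def pvPfx (l : List Int) (t : Nat) : Int := (l.take t).sum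

-- common reference: scan i upward; answer is (first t in [i+1, n] with pfx t = pfx i) - 1
def pvRefFind (l : List Int) (i : Nat) : Option Nat :=
  (List.range' (i+1) (l.length - i)).find? (fun t => pvPfx l t == pvPfx l i)

def pvRefGo (l : List Int) : List Nat → Int
  | [] => -1
  | i :: is =>
      match pvRefFind l i with
      | some t => (t : Int) - 1
      | none => pvRefGo l is

theorem pvPfx_succ (l : List Int) (t : Nat) (h : t < l.length) :
    pvPfx l (t+1) = pvPfx l t + l.getD t 0 := by
  unfold pvPfx
  rw [List.sum_take_succ l t h]
  simp [List.getD, List.getElem?_eq_getElem h]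

theorem pvInnerA_eq_find (l : List Int) :
    ∀ (k j : Nat) (s : Int), j + k ≤ l.length →
      pvInnerA l s (List.range' j k)
        = (List.range' j k).find? (fun t => s + (pvPfx l (t+1) - pvPfx l j) == 0) := by
  intro k
  induction k with
  | zero => intro j s _; simp [pvInnerA]
  | succ k ih =>
    intro j s hle
    have hj : j < l.length := by omega
    rw [List.range'_succ]
    rw [List.find?_cons]
    have hs : s + l.getD j 0 = s + (pvPfx l (j+1) - pvPfx l j) := by
      rw [pvPfx_succ l j hj]; ring
    simp only [pvInnerA]
    by_cases h0 : s + l.getD j 0 = 0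
    · rw [if_pos h0]
      have : (s + (pvPfx l (j+1) - pvPfx l j) == 0) = true := by
        rw [← hs]; exact beq_iff_eq.mpr h0
      rw [this]
    · rw [if_neg h0]
      have : (s + (pvPfx l (j+1) - pvPfx l j) == 0) = false := by
        rw [← hs]; exact beq_eq_false_iff_ne.mpr h0
      rw [this]
      rw [ih (j+1) (s + l.getD j 0) (by omega)]
      congr 1
      funext t
      have : s + l.getD j 0 + (pvPfx l (t+1) - pvPfx l (j+1)) = s + (pvPfx l (t+1) - pvPfx l j) := by
        rw [pvPfx_succ l j hj]; ring
      rw [this]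

theorem pvOuterA_eq_refGo (l : List Int) :
    ∀ is : List Nat, (∀ i ∈ is, i < l.length) → pvOuterA l is = pvRefGo l is := by
  intro is
  induction is with
  | nil => intro _; rfl
  | cons i is ih =>
    intro hmem
    have hi : i < l.length := hmem i (by simp)
    have hrec := ih (fun x hx => hmem x (by simp [hx]))
    simp only [pvOuterA, pvRefGo]
    have hrange : List.range' (i+1) (l.length - i) = (i+1) :: List.range' (i+2) (l.length - (i+1)) := by
      have : l.length - i = (l.length - (i+1)) + 1 := by omega
      rw [this, List.range'_succ]
    by_cases hc : l.getD i 0 = 0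
    · rw [if_pos hc]
      have hhead : (pvPfx l (i+1) == pvPfx l i) = true := by
        rw [pvPfx_succ l i hi, hc]; simp
      unfold pvRefFind
      rw [hrange, List.find?_cons, hhead]
      push_cast; ring
    · rw [if_neg hc]
      have hhead : (pvPfx l (i+1) == pvPfx l i) = false := by
        rw [pvPfx_succ l i hi]
        exact beq_eq_false_iff_ne.mpr (by intro h; apply hc; linarith)
      have hRF : pvRefFind l i
          = ((List.range' (i+1) (l.length - (i+1))).find?
              (fun t => pvPfx l (t+1) == pvPfx l i)).map (fun t => t+1) := by
        unfold pvRefFind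
        rw [hrange, List.find?_cons, hhead, List.range'_succ_left, List.find?_map]
        rfl
      rw [pvInnerA_eq_find l (l.length - (i+1)) (i+1) (l.getD i 0) (by omega)]
      have hpred : (fun t => l.getD i 0 + (pvPfx l (t+1) - pvPfx l (i+1)) == 0)
          = (fun t => pvPfx l (t+1) == pvPfx l i) := by
        funext t
        have : l.getD i 0 + (pvPfx l (t+1) - pvPfx l (i+1)) = pvPfx l (t+1) - pvPfx l i := by
          rw [pvPfx_succ l i hi]; ring
        rw [this]
        simp [sub_eq_zero]
      rw [hpred, hRF]
      cases hfind : (List.range' (i+1) (l.length - (i+1))).find? (fun t => pvPfx l (t+1) == pvPfx l i) with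
      | none => simp [hrec]
      | some j => simp only [Option.map_some]; push_cast; ring

theorem pvA_eq_ref (l : List Int) : find_zero_sum l = pvRefGo l (List.range l.length) := by
  exact pvOuterA_eq_refGo l _ (fun i hi => List.mem_range.mp hi)

theorem pvBuild_aux (l : List Int) :
    ∀ (acc : List Int) (a : Int),
      (l.foldl (fun acc x => acc ++ [PySem.List.pyGetD acc (-1) 0 + x]) (acc ++ [a]))
        = acc ++ List.scanl (· + ·) a l := by
  induction l with
  | nil => intro acc a; simp
  | cons x xs ih =>
    intro acc a
    simp only [List.foldl_cons, List.scanl_cons]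
    rw [PySem.List.pyGetD_neg_one_append_singleton]
    rw [show (acc ++ [a]) ++ [a + x] = acc ++ ([a] ++ [a+x]) by simp]
    have := ih (acc ++ [a]) (a + x)
    simpa using this

theorem pvScanl_eq (l : List Int) :
    ∀ a : Int, List.scanl (· + ·) a l = (List.range (l.length + 1)).map (fun t => a + pvPfx l t) := by
  induction l with
  | nil => intro a; simp [pvPfx]
  | cons x xs ih =>
    intro a
    have hr : List.map (fun t => a + pvPfx (x :: xs) t) (List.range ((xs.length+1)+1))
        = a :: List.map (fun t => a + x + pvPfx xs t) (List.range (xs.length + 1)) := by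
      rw [List.range_succ_eq_map]
      simp only [List.map_cons, List.map_map]
      congr 1
      · simp [pvPfx]
      · apply List.map_congr_left
        intro t _
        simp only [Function.comp_apply, Nat.succ_eq_add_one]
        have h1 : pvPfx (x :: xs) (t + 1) = x + pvPfx xs t := by
          simp [pvPfx, List.take_succ_cons]
        rw [h1]; ring
    rw [List.scanl_cons, ih (a + x), show (x :: xs).length + 1 = (xs.length+1)+1 from by simp, hr]

theorem pvBuildPrefix_eq (l : List Int) :
    pvBuildPrefix l = (List.range (l.length + 1)).map (pvPfx l) := by
  have h0 : ([0] : List Int) = [] ++ [0] := by simp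
  unfold pvBuildPrefix
  rw [h0, pvBuild_aux l [] 0, pvScanl_eq l 0]
  simp [pvPfx]

theorem pvLast_spec (pre : List Int) :
    ∀ v ∈ pre, ∃ t : Nat, (pvLastDict pre).get? v = some (t:Int) ∧ t < pre.length ∧
      pre.getD t 0 = v ∧ ∀ u, t < u → u < pre.length → pre.getD u 0 ≠ v := by
  induction pre using List.reverseRecOn with
  | nil => intro v hv; simp at hv
  | append_singleton pre x ih =>
    have hd : pvLastDict (pre ++ [x]) = (pvLastDict pre).insert x (pre.length : Int) := by
      unfold pvLastDict
      rw [PySem.List.enumerate_append, List.foldl_append]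
      simp
    intro v hv
    by_cases hvx : v = x
    · refine ⟨pre.length, ?_, by simp, ?_, ?_⟩
      · rw [hd, hvx, PySem.Dict.get?_insert_self]
      · simp [hvx]
      · intro u hu hu'; simp at hu'; omega
    · have hvpre : v ∈ pre := by
        rcases List.mem_append.mp hv with h | h
        · exact h
        · simp at h; exact absurd h hvx
      obtain ⟨t, hget, hlt, hat, hmax⟩ := ih v hvpre
      refine ⟨t, ?_, by simp; omega, ?_, ?_⟩
      · rw [hd, PySem.Dict.get?_insert_of_ne (hne := hvx), hget]
      · rw [List.getD_append _ _ _ _ hlt]; exact hat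
      · intro u hu hu'
        simp at hu'
        by_cases hu2 : u < pre.length
        · rw [List.getD_append _ _ _ _ hu2]; exact hmax u hu hu2
        · have : u = pre.length := by omega
          subst this
          rw [List.getD_append_right _ _ _ _ (le_refl _)]
          simpa using fun h => hvx h.symm

-- general helper: find? only looks at members
theorem pvFind?_congr {α : Type} (l : List α) (p q : α → Bool) (h : ∀ x ∈ l, p x = q x) :
    l.find? p = l.find? q := by
  induction l with
  | nil => rfl
  | cons x xs ih =>
    rw [List.find?_cons, List.find?_cons, h x (by simp)]
    split
    · rfl
    · exact ih (fun y hy => h y (by simp [hy]))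

theorem pvEnumerate_map_range (f : Nat → Int) :
    ∀ c : Nat, PySem.List.enumerate ((List.range c).map f) 0
      = (List.range c).map (fun (i : Nat) => ((@Nat.cast Int _ i), f i)) := by
  intro c
  induction c with
  | zero => simp
  | succ c ih =>
    rw [List.range_succ]
    simp only [List.map_append, List.map_cons, List.map_nil]
    rw [PySem.List.enumerate_append, ih]
    simp

theorem pvFindT_eq (pre : List Int) (v : Int) :
    ∀ ts : List Nat, pvFindT pre v (ts.map (@Nat.cast Int _))
      = (ts.find? (fun t => pre.getD t 0 == v)).map (@Nat.cast Int _) := by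
  intro ts
  induction ts with
  | nil => rfl
  | cons t ts ih =>
    by_cases h : pre.getD t 0 = v
    · rw [List.map_cons, List.find?_cons_of_pos (by simpa using h)]
      simp only [pvFindT, PySem.List.pyGetD_natCast]
      rw [if_pos h, Option.map_some]
    · rw [List.map_cons, List.find?_cons_of_neg (by simpa using h)]
      simp only [pvFindT, PySem.List.pyGetD_natCast]
      rw [if_neg h, ih]

theorem pvPyRange_cast (a b : Nat) :
    PySem.List.pyRange (a:Int) (b:Int) 1 = (List.range' a (b - a)).map (@Nat.cast Int _) := by
  rw [PySem.List.pyRange_one, List.range'_eq_map_range, List.map_map]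
  have h1 : ((b:Int) - (a:Int)).toNat = b - a := by omega
  rw [h1]
  apply List.map_congr_left
  intro k _
  simp only [Function.comp_apply]
  push_cast
  ring

theorem pvPRE_getD (l : List Int) (t : Nat) (h : t ≤ l.length) :
    ((List.range (l.length+1)).map (pvPfx l)).getD t 0 = pvPfx l t := by
  rw [List.getD_eq_getElem?_getD]
  rw [List.getElem?_map]
  rw [List.getElem?_range (by omega)]
  rfl

theorem pvOuterB_eq (l : List Int) :
    ∀ is : List Nat, (∀ i ∈ is, i ≤ l.length) →
      pvOuterB ((List.range (l.length+1)).map (pvPfx l)) l.length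
          (pvLastDict ((List.range (l.length+1)).map (pvPfx l)))
          (is.map (fun (i : Nat) => ((@Nat.cast Int _ i), pvPfx l i)))
        = pvRefGo l is := by
  set n := l.length with hn
  set PRE := (List.range (n+1)).map (pvPfx l) with hPRE
  have hlen : PRE.length = n + 1 := by simp [hPRE]
  intro is
  induction is with
  | nil => intro _; rfl
  | cons i is ih =>
    intro hmem
    have hi : i ≤ n := hmem i (by simp)
    have hrec := ih (fun x hx => hmem x (by simp [hx]))
    simp only [List.map_cons, pvOuterB, pvRefGo]
    -- the dict's entry for pfx i
    have hv : pvPfx l i ∈ PRE := by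
      rw [hPRE]
      exact List.mem_map.mpr ⟨i, List.mem_range.mpr (by omega), rfl⟩
    obtain ⟨T, hget, hTlt, hTat, hTmax⟩ := pvLast_spec PRE (pvPfx l i) hv
    have hgetD : (pvLastDict PRE).getD (pvPfx l i) 0 = (T : Int) := by
      rw [PySem.Dict.getD_eq_get?_getD, hget]; rfl
    -- the condition is equivalent to the existence of a later equal prefix
    have hcond : ((pvLastDict PRE).getD (pvPfx l i) 0 > (i:Int))
        ↔ ∃ u, i < u ∧ u ≤ n ∧ pvPfx l u = pvPfx l i := by
      rw [hgetD]
      have hTn : T ≤ n := by rw [hlen] at hTlt; omega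
      constructor
      · intro h
        refine ⟨T, by exact_mod_cast h, hTn, ?_⟩
        have := hTat
        rwa [hPRE, pvPRE_getD l T (by omega)] at this
      · rintro ⟨u, hu1, hu2, hu3⟩
        have huat : PRE.getD u 0 = pvPfx l i := by
          rw [hPRE, pvPRE_getD l u (by omega)]; exact hu3
        have hub : u ≤ T := by
          by_contra hc
          exact hTmax u (by omega) (by rw [hlen]; omega) huat
        exact_mod_cast (by omega : (i:Int) < (T:Int))
    -- B's inner scan equals the reference find, up to the cast
    have hrange' : PySem.List.pyRange ((i:Int)+1) ((n:Int)+1) 1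
        = (List.range' (i+1) (n - i)).map (@Nat.cast Int _) := by
      have hci : ((i:Int)+1) = (((i+1 : Nat)):Int) := by push_cast; ring
      have hcnt : (n+1)-(i+1) = n - i := by omega
      rw [hci, show ((n:Int)+1) = (((n+1:Nat)):Int) from by push_cast; ring, pvPyRange_cast, hcnt]
    have hfind : pvFindT PRE (pvPfx l i) (PySem.List.pyRange ((i:Int)+1) ((n:Int)+1) 1)
        = (pvRefFind l i).map (@Nat.cast Int _) := by
      rw [hrange', pvFindT_eq]
      unfold pvRefFind
      rw [← hn]
      congr 1
      apply pvFind?_congr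
      intro t ht
      have ht' : t ≤ n := by
        have := List.mem_range'_1.mp ht
        omega
      rw [hPRE, pvPRE_getD l t ht']
    -- existence matches find?.isSome
    have hex : (∃ u, i < u ∧ u ≤ n ∧ pvPfx l u = pvPfx l i) ↔ (pvRefFind l i).isSome := by
      unfold pvRefFind
      rw [← hn, List.find?_isSome]
      constructor
      · rintro ⟨u, h1, h2, h3⟩
        exact ⟨u, List.mem_range'_1.mpr (by omega), by simp [h3]⟩
      · rintro ⟨u, hu, hp⟩
        have := List.mem_range'_1.mp hu
        exact ⟨u, by omega, by omega, by simpa using hp⟩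
    cases hRF : pvRefFind l i with
    | some t =>
      have : (pvLastDict PRE).getD (pvPfx l i) 0 > (i:Int) := by
        rw [hcond, hex, hRF]; rfl
      rw [if_pos this, hfind, hRF]
      rfl
    | none =>
      have : ¬ ((pvLastDict PRE).getD (pvPfx l i) 0 > (i:Int)) := by
        rw [hcond, hex, hRF]; simp
      rw [if_neg this]
      exact hrec

theorem pvRefFind_len (l : List Int) : pvRefFind l l.length = none := by
  simp [pvRefFind]

theorem pvRefGo_append_len (l : List Int) :
    ∀ is : List Nat, pvRefGo l (is ++ [l.length]) = pvRefGo l is := by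
  intro is
  induction is with
  | nil => simp [pvRefGo, pvRefFind_len]
  | cons i is ih =>
    simp only [List.cons_append, pvRefGo]
    cases pvRefFind l i with
    | some t => rfl
    | none => exact ih

theorem pvB_eq_ref (l : List Int) : find_zero_sum_alt l = pvRefGo l (List.range l.length) := by
  show pvOuterB (pvBuildPrefix l) l.length (pvLastDict (pvBuildPrefix l))
      (PySem.List.enumerate (pvBuildPrefix l) 0) = _
  rw [pvBuildPrefix_eq, pvEnumerate_map_range (pvPfx l) (l.length + 1)]
  rw [pvOuterB_eq l (List.range (l.length+1))
    (fun i hi => Nat.lt_succ_iff.mp (List.mem_range.mp hi))]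
  rw [List.range_succ, pvRefGo_append_len]

-- ===== VERDICT (by name: the statement is the Claim_ definition above) =====
theorem find_zero_sum_spec : Claim_equal_find_zero_sum := by
  intro l _
  unfold Spec_find_zero_sum
  rw [pvA_eq_ref, pvB_eq_ref]
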